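-- pv_equiv track=rewrite | github.com/danvk/hybrid-boggle | boggle/letter_grouping.py | reverse_letter_map
-- ===== SOURCE A (Python) =====
-- def reverse_letter_map(letter_map: dict[str, str]):
--     out = {}
--     for k, v in letter_map.items():
--         out.setdefault(v, "")
--         out[v] += k
--     for k in out:
--         out[k] = "".join(sorted(out[k]))
--     return out
-- ===== SOURCE B (Python) =====
-- def reverse_letter_map(letter_map: dict[str, str]):
--     # one dict-comprehension over the distinct values (first-occurrence order);
--     # for each value, gather every key mapped to it and sort at character level
--     return {
--         v: "".join(sorted("".join(k for k, w in letter_map.items() if w == v)))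
--         for v in dict.fromkeys(letter_map.values())
--     }
-- ===== Notes on version B (the rewrite author's own statement) =====
-- stated objective: alternative
-- what changed: Replaces the two-pass dict accumulation (setdefault/+= then an in-place re-sort loop) by a single dict comprehension over the distinct values that gathers and sorts each value's keys directly.
import Mathlib
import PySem

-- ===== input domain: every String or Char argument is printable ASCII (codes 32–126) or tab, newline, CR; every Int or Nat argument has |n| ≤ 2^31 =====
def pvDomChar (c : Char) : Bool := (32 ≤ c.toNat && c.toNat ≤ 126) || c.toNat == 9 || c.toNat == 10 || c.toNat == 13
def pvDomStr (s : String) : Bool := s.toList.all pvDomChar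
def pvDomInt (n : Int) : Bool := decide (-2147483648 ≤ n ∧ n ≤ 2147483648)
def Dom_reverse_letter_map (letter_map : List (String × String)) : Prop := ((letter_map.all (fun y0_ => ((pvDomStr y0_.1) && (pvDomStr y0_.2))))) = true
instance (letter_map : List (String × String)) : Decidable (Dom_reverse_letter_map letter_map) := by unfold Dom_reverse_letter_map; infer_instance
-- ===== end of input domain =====

-- B replaces A's two-pass dict accumulation by one comprehension over the distinct values;
-- equivalence of the returned dict (as an insertion-ordered association list) is proved for all inputs.

-- ===== PORT A =====
-- first loop: out.setdefault(v, ""); out[v] += k   ==  out[v] = out.get(v, "") + k  ==  Dict.modify v "" (· ++ k)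
-- second loop rewrites each value in place (key order unchanged): mapped over the items list
def reverse_letter_map (letter_map : List (String × String)) : List (String × String) :=
  let out : PySem.Dict String String :=
    letter_map.foldl (fun d kv => d.modify kv.2 "" (fun s => s ++ kv.1)) PySem.Dict.empty
  out.items.map (fun p => (p.1, String.ofList (PySem.List.sorted p.2.toList (fun c => c) false)))

-- ===== PORT B =====
-- {v: "".join(sorted("".join(k for k, w in letter_map.items() if w == v))) for v in dict.fromkeys(letter_map.values())}
def reverse_letter_map_alt (letter_map : List (String × String)) : List (String × String) :=
  (PySem.List.dedup (letter_map.map (fun p => p.2))).map (fun v =>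
    (v, String.ofList (PySem.List.sorted
          (letter_map.flatMap (fun p => if p.2 == v then p.1.toList else [])) (fun c => c) false)))

-- ===== PRECONDITION & SPEC =====
def Spec_reverse_letter_map (letter_map : List (String × String)) (out : List (String × String)) : Prop := out = reverse_letter_map_alt letter_map
instance (letter_map : List (String × String)) (out : List (String × String)) : Decidable (Spec_reverse_letter_map letter_map out) := by unfold Spec_reverse_letter_map; infer_instance

-- ===== CLAIM (what is proved, stated in full; the proofs are below) =====
def Claim_equal_reverse_letter_map : Prop := ∀ (letter_map : List (String × String)), Dom_reverse_letter_map letter_map → Spec_reverse_letter_map letter_map (reverse_letter_map letter_map)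

-- ===== LEMMAS AND PROOFS =====

-- the accumulated value at key v is the fold of the keys whose value is v
theorem rlm_getD_foldl (l : List (String × String)) (d : PySem.Dict String String) (v : String) :
    (l.foldl (fun d kv => d.modify kv.2 "" (fun s => s ++ kv.1)) d).getD v ""
      = (l.filter (fun p => p.2 == v)).foldl (fun s p => s ++ p.1) (d.getD v "") := by
  induction l generalizing d with
  | nil => rfl
  | cons p t ih =>
    simp only [List.foldl_cons, List.filter_cons]
    rw [ih]
    by_cases h : p.2 = v
    · simp [h]
    · rw [PySem.Dict.getD_modify, if_neg (Ne.symm h)]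
      simp [h]

-- a dict with Nodup keys is its keys paired with their getD values
theorem rlm_items_eq (d : PySem.Dict String String) (h : d.keys.Nodup) :
    d.items = d.keys.map (fun k => (k, d.getD k "")) := by
  have : d.keys.map (fun k => (k, d.getD k "")) = d.items.map (fun p => (p.1, d.getD p.1 "")) := by
    simp [PySem.Dict.keys, List.map_map]
  rw [this]
  conv_lhs => rw [show d.items = d.items.map id from (List.map_id d.items).symm]
  apply List.map_congr_left
  intro p hp
  have := PySem.Dict.getD_of_mem_items d (k := p.1) (v := p.2) (by simpa using hp) h ""
  simp [this]

-- chars of the string fold = concatenation of the chars of the keys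
theorem rlm_toList_foldl (m : List (String × String)) (s0 : String) :
    (m.foldl (fun s p => s ++ p.1) s0).toList = s0.toList ++ m.flatMap (fun p => p.1.toList) := by
  induction m generalizing s0 with
  | nil => simp
  | cons p t ih => simp [ih, String.toList_append]

-- the guarded flatMap is the flatMap over the filtered list
theorem rlm_flatMap_filter (l : List (String × String)) (v : String) :
    l.flatMap (fun p => if p.2 == v then p.1.toList else [])
      = (l.filter (fun p => p.2 == v)).flatMap (fun p => p.1.toList) := by
  induction l with
  | nil => rfl
  | cons p t ih =>
    simp only [beq_iff_eq] at ih
    by_cases h : p.2 = v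
    · simp [List.flatMap_cons, h, ih]
    · simp [List.flatMap_cons, h, ih]

theorem rlm_keys_eq (l : List (String × String)) :
    (l.foldl (fun d kv => d.modify kv.2 "" (fun s => s ++ kv.1)) PySem.Dict.empty).keys
      = PySem.List.dedup (l.map (fun p => p.2)) := by
  have h := PySem.Dict.keys_foldl_modify_key l (fun kv => kv.2) ""
      (fun _ kv => (fun s => s ++ kv.1)) PySem.Dict.empty
  simpa [PySem.List.dedup_eq_ofList] using h

-- ===== VERDICT (by name: the statement is the Claim_ definition above) =====
theorem reverse_letter_map_spec : Claim_equal_reverse_letter_map := by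
  intro l _
  have hnodup : (l.foldl (fun d kv => d.modify kv.2 "" (fun s => s ++ kv.1))
      PySem.Dict.empty).keys.Nodup :=
    PySem.Dict.nodup_keys_foldl_modify_key l (fun kv => kv.2) ""
      (fun _ kv => (fun s => s ++ kv.1)) PySem.Dict.empty (by simp)
  show _ = _
  simp only [reverse_letter_map, reverse_letter_map_alt]
  rw [rlm_items_eq _ hnodup, rlm_keys_eq, List.map_map]
  apply List.map_congr_left
  intro v _
  simp only [Function.comp_apply]
  congr 1
  rw [rlm_getD_foldl, rlm_toList_foldl, rlm_flatMap_filter]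
  simp [PySem.Dict.getD_empty]
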